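-- pv_equiv track=rewrite | github.com/havilah-12/BizAI | app/tools.py | _business_framework
-- ===== SOURCE A (Python) =====
-- _FRAMEWORKS: dict[str, str] = {
--     "SWOT": """### SWOT
-- - **Strengths:** (internal positives)
-- - **Weaknesses:** (internal gaps)
-- - **Opportunities:** (external upside)
-- - **Threats:** (external risks)
-- - **So what:** 2–3 implications and one priority action.""",
--     "OKR": """### OKR sketch
-- - **Objective:** (qualitative, inspiring, time-bound)
-- - **Key results:** (3 metrics, measurable; baseline → target)
-- - **Initiatives:** (what you'll ship this quarter)
-- - **Risks / dependencies:** (what could block success)""",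
--     "RACI": """### RACI
-- | Task / deliverable | R (Responsible) | A (Accountable) | C (Consulted) | I (Informed) |
-- | --- | --- | --- | --- | --- |
-- | (row 1) | | | | |
-- - **Notes:** single Accountable per major item; avoid too many C's.""",
--     "porter_five_forces": """### Porter's Five Forces
-- 1. **Rivalry** among existing competitors
-- 2. **Threat of new entrants**
-- 3. **Bargaining power of suppliers**
-- 4. **Bargaining power of buyers**
-- 5. **Threat of substitutes**
-- - **Implication:** where is profit most at risk / most defensible?""",
--     "lean_canvas": """### Lean Canvas (one page)
-- - **Problem** | **Solution** | **Unique value prop**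
-- - **Unfair advantage** | **Customer segments** | **Channels**
-- - **Cost structure** | **Revenue streams** | **Key metrics**
-- - **Bottom line:** riskiest assumptions to test first.""",
--     "elevator_pitch": """### Elevator pitch structure (~30s)
-- - **For** [customer segment]
-- - **who** [key problem],
-- - **our** [product] **is a** [category]
-- - **that** [key benefit].
-- - **Unlike** [alternatives], **we** [differentiator].""",
--     "meeting_agenda": """### Meeting agenda template
-- 1. **Purpose & outcomes** (what “done” looks like)
-- 2. **Decisions needed** (list)
-- 3. **Discussion** (timeboxed topics)
-- 4. **Actions** (owner + due date)
-- 5. **Next check-in**""",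
-- }
--
-- def _business_framework(framework: str) -> str:
--     key = framework.strip()
--     if key in _FRAMEWORKS:
--         return _FRAMEWORKS[key]
--     upper = key.upper()
--     if upper in _FRAMEWORKS:
--         return _FRAMEWORKS[upper]
--     norm = key.lower().replace(" ", "_").replace("-", "_")
--     for k, v in _FRAMEWORKS.items():
--         if k.lower() == norm:
--             return v
--     return _FRAMEWORKS["SWOT"]
-- ===== SOURCE B (Python) =====
-- _FRAMEWORKS: dict[str, str] = {
--     "SWOT": """### SWOT
-- - **Strengths:** (internal positives)
-- - **Weaknesses:** (internal gaps)
-- - **Opportunities:** (external upside)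
-- - **Threats:** (external risks)
-- - **So what:** 2–3 implications and one priority action.""",
--     "OKR": """### OKR sketch
-- - **Objective:** (qualitative, inspiring, time-bound)
-- - **Key results:** (3 metrics, measurable; baseline → target)
-- - **Initiatives:** (what you'll ship this quarter)
-- - **Risks / dependencies:** (what could block success)""",
--     "RACI": """### RACI
-- | Task / deliverable | R (Responsible) | A (Accountable) | C (Consulted) | I (Informed) |
-- | --- | --- | --- | --- | --- |
-- | (row 1) | | | | |
-- - **Notes:** single Accountable per major item; avoid too many C's.""",
--     "porter_five_forces": """### Porter's Five Forces
-- 1. **Rivalry** among existing competitors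
-- 2. **Threat of new entrants**
-- 3. **Bargaining power of suppliers**
-- 4. **Bargaining power of buyers**
-- 5. **Threat of substitutes**
-- - **Implication:** where is profit most at risk / most defensible?""",
--     "lean_canvas": """### Lean Canvas (one page)
-- - **Problem** | **Solution** | **Unique value prop**
-- - **Unfair advantage** | **Customer segments** | **Channels**
-- - **Cost structure** | **Revenue streams** | **Key metrics**
-- - **Bottom line:** riskiest assumptions to test first.""",
--     "elevator_pitch": """### Elevator pitch structure (~30s)
-- - **For** [customer segment]
-- - **who** [key problem],
-- - **our** [product] **is a** [category]
-- - **that** [key benefit].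
-- - **Unlike** [alternatives], **we** [differentiator].""",
--     "meeting_agenda": """### Meeting agenda template
-- 1. **Purpose & outcomes** (what “done” looks like)
-- 2. **Decisions needed** (list)
-- 3. **Discussion** (timeboxed topics)
-- 4. **Actions** (owner + due date)
-- 5. **Next check-in**""",
-- }
--
-- _NORM = {k.lower(): v for k, v in _FRAMEWORKS.items()}
--
-- def _business_framework(framework: str) -> str:
--     norm = framework.strip().lower().replace(" ", "_").replace("-", "_")
--     return _NORM.get(norm, _FRAMEWORKS["SWOT"])
-- ===== Notes on version B (the rewrite author's own statement) =====
-- stated objective: simpler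
-- what changed: Replaces the three staged fallbacks (exact match, upper-cased match, linear scan comparing lower-cased keys) with one precomputed lowercase-normalized index and a single dict lookup with the SWOT default; correct because every key is distinct after normalization and each stage selects the normalization-matching entry.
import Mathlib
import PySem

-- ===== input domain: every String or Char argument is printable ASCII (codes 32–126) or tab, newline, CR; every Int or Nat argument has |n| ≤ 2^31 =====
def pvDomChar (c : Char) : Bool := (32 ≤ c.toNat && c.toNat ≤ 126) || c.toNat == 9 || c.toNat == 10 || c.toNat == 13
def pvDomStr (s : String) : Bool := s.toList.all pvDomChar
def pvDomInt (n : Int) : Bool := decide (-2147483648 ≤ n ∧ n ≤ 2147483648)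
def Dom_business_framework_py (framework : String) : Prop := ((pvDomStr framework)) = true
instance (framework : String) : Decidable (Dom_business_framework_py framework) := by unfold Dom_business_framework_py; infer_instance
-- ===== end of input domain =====

set_option maxRecDepth 100000

-- B replaces A's three staged lookups with one precomputed lowercase-normalized index and a single lookup (simpler; same results).

-- ===== PORT A =====
def tSWOT : String := "### SWOT\n- **Strengths:** (internal positives)\n- **Weaknesses:** (internal gaps)\n- **Opportunities:** (external upside)\n- **Threats:** (external risks)\n- **So what:** 2–3 implications and one priority action."

def tOKR : String := "### OKR sketch\n- **Objective:** (qualitative, inspiring, time-bound)\n- **Key results:** (3 metrics, measurable; baseline → target)\n- **Initiatives:** (what you'll ship this quarter)\n- **Risks / dependencies:** (what could block success)"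

def tRACI : String := "### RACI\n| Task / deliverable | R (Responsible) | A (Accountable) | C (Consulted) | I (Informed) |\n| --- | --- | --- | --- | --- |\n| (row 1) | | | | |\n- **Notes:** single Accountable per major item; avoid too many C's."

def tPORTER : String := "### Porter's Five Forces\n1. **Rivalry** among existing competitors\n2. **Threat of new entrants**\n3. **Bargaining power of suppliers**\n4. **Bargaining power of buyers**\n5. **Threat of substitutes**\n- **Implication:** where is profit most at risk / most defensible?"

def tLEAN : String := "### Lean Canvas (one page)\n- **Problem** | **Solution** | **Unique value prop**\n- **Unfair advantage** | **Customer segments** | **Channels**\n- **Cost structure** | **Revenue streams** | **Key metrics**\n- **Bottom line:** riskiest assumptions to test first."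

def tELEV : String := "### Elevator pitch structure (~30s)\n- **For** [customer segment]\n- **who** [key problem],\n- **our** [product] **is a** [category]\n- **that** [key benefit].\n- **Unlike** [alternatives], **we** [differentiator]."

def tMEET : String := "### Meeting agenda template\n1. **Purpose & outcomes** (what “done” looks like)\n2. **Decisions needed** (list)\n3. **Discussion** (timeboxed topics)\n4. **Actions** (owner + due date)\n5. **Next check-in**"

def pvFrameworks : PySem.Dict String String := PySem.Dict.mk [("SWOT", tSWOT), ("OKR", tOKR), ("RACI", tRACI), ("porter_five_forces", tPORTER), ("lean_canvas", tLEAN), ("elevator_pitch", tELEV), ("meeting_agenda", tMEET)]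

-- the 'for k, v in _FRAMEWORKS.items()' loop; falling off the loop returns _FRAMEWORKS["SWOT"]
def fwLoop (norm : String) : List (String × String) → String
  | [] => (pvFrameworks.get? "SWOT").getD ""
  | (k, v) :: rest => if PySem.Str.lower k == norm then v else fwLoop norm rest

def business_framework_py (framework : String) : String :=
  if pvFrameworks.contains (PySem.Str.strip framework) then
    (pvFrameworks.get? (PySem.Str.strip framework)).getD ""
  else if pvFrameworks.contains (PySem.Str.upper (PySem.Str.strip framework)) then
    (pvFrameworks.get? (PySem.Str.upper (PySem.Str.strip framework))).getD ""
  else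
    fwLoop (PySem.Str.replace (PySem.Str.replace (PySem.Str.lower (PySem.Str.strip framework)) " " "_") "-" "_")
      pvFrameworks.items

-- ===== PORT B =====
-- _NORM = {k.lower(): v for k, v in _FRAMEWORKS.items()}
def pvNormIndex : PySem.Dict String String :=
  PySem.Dict.ofList (pvFrameworks.items.map (fun p => (PySem.Str.lower p.1, p.2)))

def business_framework_py_alt (framework : String) : String :=
  pvNormIndex.getD
    (PySem.Str.replace (PySem.Str.replace (PySem.Str.lower (PySem.Str.strip framework)) " " "_") "-" "_")
    ((pvFrameworks.get? "SWOT").getD "")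

-- ===== PRECONDITION & SPEC =====
def Spec_business_framework_py (framework : String) (out : String) : Prop := out = business_framework_py_alt framework
instance (framework : String) (out : String) : Decidable (Spec_business_framework_py framework out) := by unfold Spec_business_framework_py; infer_instance

-- ===== CLAIM (what is proved, stated in full; the proofs are below) =====
def Claim_equal_business_framework_py : Prop := ∀ (framework : String), Dom_business_framework_py framework → Spec_business_framework_py framework (business_framework_py framework)

-- ===== LEMMAS AND PROOFS =====
theorem char_toNat_le_of_le {a b : Char} (h : a ≤ b) : a.toNat ≤ b.toNat :=
  UInt32.le_iff_toNat_le.mp (Char.le_def.mp h)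

theorem char_le_of_toNat_le {a b : Char} (h : a.toNat ≤ b.toNat) : a ≤ b :=
  Char.le_def.mpr (UInt32.le_iff_toNat_le.mpr h)

theorem lowerChar_upperChar (c : Char) :
    PySem.Chars.lowerChar (PySem.Chars.upperChar c) = PySem.Chars.lowerChar c := by
  unfold PySem.Chars.lowerChar PySem.Chars.upperChar PySem.Chars.islower PySem.Chars.isupper
  by_cases h : 'a' ≤ c ∧ c ≤ 'z'
  · obtain ⟨h1, h2⟩ := h
    have hv1 : 97 ≤ c.toNat := char_toNat_le_of_le h1
    have hv2 : c.toNat ≤ 122 := char_toNat_le_of_le h2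
    have ht : (decide ('a' ≤ c) && decide (c ≤ 'z')) = true := by simp [h1, h2]
    rw [ht]
    simp only [if_true]
    have hd : (Char.ofNat (c.toNat - 32)).toNat = c.toNat - 32 := by
      rw [Char.toNat_ofNat]
      have : (c.toNat - 32).isValidChar := by
        left
        omega
      simp [this]
    have hup : (decide ('A' ≤ Char.ofNat (c.toNat - 32)) &&
        decide (Char.ofNat (c.toNat - 32) ≤ 'Z')) = true := by
      have hA : 'A' ≤ Char.ofNat (c.toNat - 32) := by
        apply char_le_of_toNat_le
        rw [hd]
        change 65 ≤ _
        omega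
      have hZ : Char.ofNat (c.toNat - 32) ≤ 'Z' := by
        apply char_le_of_toNat_le
        rw [hd]
        change _ ≤ 90
        omega
      simp [hA, hZ]
    rw [hup]
    simp only [if_true]
    have hnotup : (decide ('A' ≤ c) && decide (c ≤ 'Z')) = false := by
      apply Bool.and_eq_false_iff.mpr
      right
      apply decide_eq_false
      intro hc
      have := char_toNat_le_of_le hc
      change c.toNat ≤ 90 at this
      omega
    rw [hnotup]
    simp only [Bool.false_eq_true, if_false]
    rw [hd]
    have : c.toNat - 32 + 32 = c.toNat := by omega
    rw [this, Char.ofNat_toNat]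
  · have hfalse : (decide ('a' ≤ c) && decide (c ≤ 'z')) = false := by
      rw [Bool.and_eq_false_iff]
      by_cases h1 : 'a' ≤ c
      · right
        exact decide_eq_false fun h2 => h ⟨h1, h2⟩
      · left
        exact decide_eq_false h1
    rw [hfalse]
    simp

theorem lower_upper (s : String) :
    PySem.Str.lower (PySem.Str.upper s) = PySem.Str.lower s := by
  simp only [PySem.Str.lower, PySem.Str.upper, PySem.Chars.lower, PySem.Chars.upper]
  rw [String.toList_ofList, List.map_map]
  congr 1
  exact List.map_congr_left fun c _ => lowerChar_upperChar c

theorem keys7 (k : String) (h : pvFrameworks.contains k = true) :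
    k = "SWOT" ∨ k = "OKR" ∨ k = "RACI" ∨ k = "porter_five_forces" ∨
    k = "lean_canvas" ∨ k = "elevator_pitch" ∨ k = "meeting_agenda" := by
  simp [pvFrameworks, PySem.Dict.contains] at h
  tauto

theorem fwLoop_eq (n : String) (l : List (String × String)) :
    fwLoop n l =
      ((PySem.Dict.mk (l.map (fun p => (PySem.Str.lower p.1, p.2)))).get? n).getD
        ((pvFrameworks.get? "SWOT").getD "") := by
  induction l with
  | nil => rfl
  | cons p rest ih =>
    obtain ⟨k, v⟩ := p
    simp only [fwLoop, List.map_cons, PySem.Dict.get?_mk_cons]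
    by_cases h : (PySem.Str.lower k == n) = true
    · simp only [h, if_true, Option.getD_some]
    · have h' : (PySem.Str.lower k == n) = false := by simpa using h
      simp only [h', Bool.false_eq_true, if_false]
      exact ih

theorem loop_getD (n : String) :
    fwLoop n pvFrameworks.items = pvNormIndex.getD n ((pvFrameworks.get? "SWOT").getD "") := by
  have e : pvNormIndex =
      PySem.Dict.mk (pvFrameworks.items.map (fun p => (PySem.Str.lower p.1, p.2))) := by rfl
  rw [e, PySem.Dict.getD]
  exact fwLoop_eq n _

theorem normIndex_lit : pvNormIndex = PySem.Dict.mk [("swot", tSWOT), ("okr", tOKR), ("raci", tRACI), ("porter_five_forces", tPORTER), ("lean_canvas", tLEAN), ("elevator_pitch", tELEV), ("meeting_agenda", tMEET)] := by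
  rfl

theorem fact_swot : (pvFrameworks.get? "SWOT").getD "" = pvNormIndex.getD
    (PySem.Str.replace (PySem.Str.replace (PySem.Str.lower "SWOT") " " "_") "-" "_")
    ((pvFrameworks.get? "SWOT").getD "") := by
  rw [normIndex_lit,
    (by decide : PySem.Str.replace (PySem.Str.replace (PySem.Str.lower "SWOT") " " "_") "-" "_" = "swot")]
  simp [pvFrameworks, PySem.Dict.getD, PySem.Dict.get?_mk_cons]

theorem fact_okr : (pvFrameworks.get? "OKR").getD "" = pvNormIndex.getD
    (PySem.Str.replace (PySem.Str.replace (PySem.Str.lower "OKR") " " "_") "-" "_")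
    ((pvFrameworks.get? "SWOT").getD "") := by
  rw [normIndex_lit,
    (by decide : PySem.Str.replace (PySem.Str.replace (PySem.Str.lower "OKR") " " "_") "-" "_" = "okr")]
  simp [pvFrameworks, PySem.Dict.getD, PySem.Dict.get?_mk_cons]

theorem fact_raci : (pvFrameworks.get? "RACI").getD "" = pvNormIndex.getD
    (PySem.Str.replace (PySem.Str.replace (PySem.Str.lower "RACI") " " "_") "-" "_")
    ((pvFrameworks.get? "SWOT").getD "") := by
  rw [normIndex_lit,
    (by decide : PySem.Str.replace (PySem.Str.replace (PySem.Str.lower "RACI") " " "_") "-" "_" = "raci")]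
  simp [pvFrameworks, PySem.Dict.getD, PySem.Dict.get?_mk_cons]

theorem fact_porter_five_forces : (pvFrameworks.get? "porter_five_forces").getD "" = pvNormIndex.getD
    (PySem.Str.replace (PySem.Str.replace (PySem.Str.lower "porter_five_forces") " " "_") "-" "_")
    ((pvFrameworks.get? "SWOT").getD "") := by
  rw [normIndex_lit,
    (by decide : PySem.Str.replace (PySem.Str.replace (PySem.Str.lower "porter_five_forces") " " "_") "-" "_" = "porter_five_forces")]
  simp [pvFrameworks, PySem.Dict.getD, PySem.Dict.get?_mk_cons]

theorem fact_lean_canvas : (pvFrameworks.get? "lean_canvas").getD "" = pvNormIndex.getD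
    (PySem.Str.replace (PySem.Str.replace (PySem.Str.lower "lean_canvas") " " "_") "-" "_")
    ((pvFrameworks.get? "SWOT").getD "") := by
  rw [normIndex_lit,
    (by decide : PySem.Str.replace (PySem.Str.replace (PySem.Str.lower "lean_canvas") " " "_") "-" "_" = "lean_canvas")]
  simp [pvFrameworks, PySem.Dict.getD, PySem.Dict.get?_mk_cons]

theorem fact_elevator_pitch : (pvFrameworks.get? "elevator_pitch").getD "" = pvNormIndex.getD
    (PySem.Str.replace (PySem.Str.replace (PySem.Str.lower "elevator_pitch") " " "_") "-" "_")
    ((pvFrameworks.get? "SWOT").getD "") := by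
  rw [normIndex_lit,
    (by decide : PySem.Str.replace (PySem.Str.replace (PySem.Str.lower "elevator_pitch") " " "_") "-" "_" = "elevator_pitch")]
  simp [pvFrameworks, PySem.Dict.getD, PySem.Dict.get?_mk_cons]

theorem fact_meeting_agenda : (pvFrameworks.get? "meeting_agenda").getD "" = pvNormIndex.getD
    (PySem.Str.replace (PySem.Str.replace (PySem.Str.lower "meeting_agenda") " " "_") "-" "_")
    ((pvFrameworks.get? "SWOT").getD "") := by
  rw [normIndex_lit,
    (by decide : PySem.Str.replace (PySem.Str.replace (PySem.Str.lower "meeting_agenda") " " "_") "-" "_" = "meeting_agenda")]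
  simp [pvFrameworks, PySem.Dict.getD, PySem.Dict.get?_mk_cons]

-- ===== VERDICT (by name: the statement is the Claim_ definition above) =====
theorem business_framework_py_spec : Claim_equal_business_framework_py := by
  intro framework _
  unfold Spec_business_framework_py business_framework_py business_framework_py_alt
  by_cases h1 : pvFrameworks.contains (PySem.Str.strip framework) = true
  · rcases keys7 _ h1 with hk|hk|hk|hk|hk|hk|hk <;>
      rw [hk, if_pos (by decide)] <;>
      first
      | exact fact_swot
      | exact fact_okr
      | exact fact_raci
      | exact fact_porter_five_forces
      | exact fact_lean_canvas
      | exact fact_elevator_pitch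
      | exact fact_meeting_agenda
  · have h1' : pvFrameworks.contains (PySem.Str.strip framework) = false := by
      simpa using h1
    by_cases h2 : pvFrameworks.contains (PySem.Str.upper (PySem.Str.strip framework)) = true
    · rcases keys7 _ h2 with hk|hk|hk|hk|hk|hk|hk <;>
        · have hl : PySem.Str.lower (PySem.Str.strip framework) =
              PySem.Str.lower (PySem.Str.upper (PySem.Str.strip framework)) :=
            (lower_upper _).symm
          rw [hk] at hl
          rw [h1']
          simp only [Bool.false_eq_true, if_false]
          rw [hk, if_pos (by decide), hl]
          first
            | exact fact_swot
            | exact fact_okr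
            | exact fact_raci
            | exact fact_porter_five_forces
            | exact fact_lean_canvas
            | exact fact_elevator_pitch
            | exact fact_meeting_agenda
    · have h2' : pvFrameworks.contains (PySem.Str.upper (PySem.Str.strip framework)) = false := by
        simpa using h2
      rw [h1', h2']
      simp only [Bool.false_eq_true, if_false]
      exact loop_getD _
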